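-- pv_equiv track=rewrite | github.com/ArdanaCLM/ardana-configuration-processor | ardana_configurationprocessor/plugins/generators/2_0/CloudCpLiteGenerator.py | _get_region
-- ===== SOURCE A (Python) =====
-- def _get_region(cp, services):
--
--     # Phil: I hate hard coding swift here, but don't see any
--     # obvious alternative.
--     swift_comps = set(['swift'])
--
--     match = swift_comps.intersection(services)
--     if not match:
--         match = set(services)
--
--     result = None
--     for region_name in sorted(cp.get('regions', {})):
--         region_services = cp['regions'][region_name]
--         if match.intersection(region_services):
--             result = region_name
--             break
--
--     return result
-- ===== SOURCE B (Python) =====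
-- def _get_region(cp, services):
--     match = {'swift'}.intersection(services)
--     if not match:
--         match = set(services)
--
--     best = None
--     for name, svcs in cp.get('regions', {}).items():
--         if match.intersection(svcs) and (best is None or name < best):
--             best = name
--     return best
-- ===== Notes on version B (the rewrite author's own statement) =====
-- stated objective: alternative
-- what changed: Instead of sorting all region names and breaking at the first name whose services intersect the match set, B makes a single pass over the regions dict tracking the lexicographically smallest matching name; no sorted list is ever built.
import Mathlib
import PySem

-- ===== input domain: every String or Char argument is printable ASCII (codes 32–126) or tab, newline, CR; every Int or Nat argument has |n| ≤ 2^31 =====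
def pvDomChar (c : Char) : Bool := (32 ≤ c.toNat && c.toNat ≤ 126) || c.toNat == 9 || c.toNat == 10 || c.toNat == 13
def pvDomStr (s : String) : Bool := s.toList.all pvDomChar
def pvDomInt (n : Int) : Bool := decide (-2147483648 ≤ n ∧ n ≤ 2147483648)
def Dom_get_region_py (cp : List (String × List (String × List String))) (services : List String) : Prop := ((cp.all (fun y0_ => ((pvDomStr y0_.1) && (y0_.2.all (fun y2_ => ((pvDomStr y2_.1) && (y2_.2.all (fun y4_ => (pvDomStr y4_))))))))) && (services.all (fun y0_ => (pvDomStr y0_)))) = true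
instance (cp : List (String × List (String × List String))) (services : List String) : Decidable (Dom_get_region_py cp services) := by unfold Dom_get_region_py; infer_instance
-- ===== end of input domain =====

-- B replaces A's sort-then-break-at-first-hit by a single pass over the regions dict that
-- tracks the lexicographically smallest matching region name (objective: alternative).

-- ===== PORT A =====
-- 'for region_name in sorted(...): ... if ...: result = region_name; break' — first hit wins
def pvALoop (m : PySem.Set String) (regions : PySem.Dict String (List String))
    : List String → Option String
  | [] => none
  | n :: ns =>
    let region_services := regions.getD n []
    if ¬ (PySem.Set.inter m region_services).isEmpty then some n
    else pvALoop m regions ns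

def get_region_py (cp : List (String × List (String × List String))) (services : List String) : Option String :=
  let swift_comps : PySem.Set String := PySem.Set.ofList ["swift"]
  let m0 := PySem.Set.inter swift_comps services
  let m := if m0.isEmpty then PySem.Set.ofList services else m0
  let regions : PySem.Dict String (List String) :=
    PySem.Dict.ofList ((PySem.Dict.ofList cp).getD "regions" [])
  pvALoop m regions (PySem.List.sorted regions.keys (fun x => x))

-- ===== PORT B =====
def pvBStep (m : PySem.Set String) (best : Option String) (pr : String × List String) : Option String :=
  if ¬ (PySem.Set.inter m pr.2).isEmpty then
    match best with
    | none => some pr.1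
    | some b => if pr.1 < b then some pr.1 else best
  else best

def get_region_py_alt (cp : List (String × List (String × List String))) (services : List String) : Option String :=
  let m0 := PySem.Set.inter (PySem.Set.ofList ["swift"]) services
  let m := if m0.isEmpty then PySem.Set.ofList services else m0
  let regions : PySem.Dict String (List String) :=
    PySem.Dict.ofList ((PySem.Dict.ofList cp).getD "regions" [])
  regions.items.foldl (pvBStep m) none

-- ===== PRECONDITION & SPEC =====
def Spec_get_region_py (cp : List (String × List (String × List String))) (services : List String) (out : Option String) : Prop := out = get_region_py_alt cp services
instance (cp : List (String × List (String × List String))) (services : List String) (out : Option String) : Decidable (Spec_get_region_py cp services out) := by unfold Spec_get_region_py; infer_instance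

-- ===== CLAIM (what is proved, stated in full; the proofs are below) =====
def Claim_equal_get_region_py : Prop := ∀ (cp : List (String × List (String × List String))) (services : List String), Dom_get_region_py cp services → Spec_get_region_py cp services (get_region_py cp services)

-- ===== LEMMAS AND PROOFS =====

-- A's loop is find-first over the traversed list
theorem pvALoop_eq_find? (m : PySem.Set String) (regions : PySem.Dict String (List String))
    (l : List String) :
    pvALoop m regions l
      = l.find? (fun n => decide (¬ (PySem.Set.inter m (regions.getD n [])).isEmpty)) := by
  induction l with
  | nil => rfl
  | cons n ns ih =>
    by_cases h : (PySem.Set.inter m (regions.getD n [])) = [] <;>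
      simp [pvALoop, List.find?, List.isEmpty_iff, h, ih]

-- B's step with a 'some' accumulator keeps a running min of the matching names
theorem pvBFold_some (m : PySem.Set String) (l : List (String × List String)) (x : String) :
    l.foldl (pvBStep m) (some x)
      = some (((l.filter (fun pr => decide (¬ (PySem.Set.inter m pr.2).isEmpty))).map Prod.fst).foldl min x) := by
  induction l generalizing x with
  | nil => rfl
  | cons pr t ih =>
    by_cases h : (PySem.Set.inter m pr.2) = []
    · simp [pvBStep, List.isEmpty_iff, h, ih]
    · simp only [pvBStep, List.isEmpty_iff, h, List.foldl_cons, List.filter_cons, decide_not,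
        decide_false, Bool.not_false, List.map_cons, not_false_iff, if_pos]
      by_cases hlt : pr.1 < x
      · simp [hlt, ih, min_eq_right (le_of_lt hlt)]
      · simp [hlt, ih, min_eq_left (le_of_not_gt hlt)]

-- B's fold computes min? of the matching names
theorem pvBFold_eq_min? (m : PySem.Set String) (l : List (String × List String)) :
    l.foldl (pvBStep m) none
      = PySem.List.min? ((l.filter (fun pr => decide (¬ (PySem.Set.inter m pr.2).isEmpty))).map Prod.fst) (fun y => y) := by
  induction l with
  | nil => rfl
  | cons pr t ih =>
    by_cases h : (PySem.Set.inter m pr.2) = []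
    · simp [pvBStep, List.isEmpty_iff, h, ih]
    · simp only [List.foldl_cons, List.filter_cons, List.isEmpty_iff, h, decide_not,
        decide_false, Bool.not_false, if_true, List.map_cons, PySem.List.min?_id_cons]
      simp only [pvBStep, List.isEmpty_iff, h, not_false_iff, if_pos]
      rw [pvBFold_some m t pr.1]
      simp

-- membership in items from a successful lookup
theorem pv_get?_mem_items (d : PySem.Dict String (List String)) (k : String) (v : List String)
    (h : d.get? k = some v) : (k, v) ∈ d.items := by
  simp only [PySem.Dict.get?, Option.map_eq_some_iff] at h
  obtain ⟨pr, hfind, hsnd⟩ := h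
  have hmem := List.mem_of_find?_eq_some hfind
  have hp := List.find?_some hfind
  simp at hp
  cases pr
  simp_all

-- a key of the dict has a value, and that pair is in items
theorem pv_mem_keys_exists (d : PySem.Dict String (List String)) (k : String)
    (h : k ∈ d.keys) : ∃ v, (k, v) ∈ d.items ∧ d.getD k [] = v := by
  have hc : d.contains k = true := (PySem.Dict.contains_iff_mem_keys d k).2 h
  cases hv : d.get? k with
  | none =>
    rw [PySem.Dict.get?_eq_none_iff_contains] at hv
    simp [hc] at hv
  | some v =>
    exact ⟨v, pv_get?_mem_items d k v hv, by rw [PySem.Dict.getD_eq_get?_getD, hv]; rfl⟩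

-- a pair of items has its fst among the keys and (keys nodup) the right getD value
theorem pv_mem_items_getD (d : PySem.Dict String (List String)) (hn : d.keys.Nodup)
    (pr : String × List String) (h : pr ∈ d.items) : d.getD pr.1 [] = pr.2 := by
  have := PySem.Dict.get?_of_mem_items (d := d) (k := pr.1) (v := pr.2) (by cases pr; exact h) hn
  rw [PySem.Dict.getD_eq_get?_getD, this]; rfl

theorem pv_keys_eq_map_fst (d : PySem.Dict String (List String)) :
    d.keys = d.items.map Prod.fst := by
  simp [PySem.Dict.keys]

-- main equivalence for the loops over one dict
theorem pv_loops_agree (m : PySem.Set String) (d : PySem.Dict String (List String))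
    (hn : d.keys.Nodup) :
    pvALoop m d (PySem.List.sorted d.keys (fun x => x)) = d.items.foldl (pvBStep m) none := by
  classical
  set p : String → Bool := fun n => decide (¬ (PySem.Set.inter m (d.getD n [])).isEmpty) with hp
  set q : (String × List String) → Bool := fun pr => decide (¬ (PySem.Set.inter m pr.2).isEmpty) with hq
  rw [pvALoop_eq_find?, pvBFold_eq_min? m d.items]
  set ns := ((d.items.filter q).map Prod.fst) with hns
  -- q on an item pair agrees with p on its key
  have hpq : ∀ pr ∈ d.items, q pr = p pr.1 := by
    intro pr hpr
    simp only [hp, hq, pv_mem_items_getD d hn pr hpr]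
  have hns_sub : ∀ n ∈ ns, n ∈ d.keys ∧ p n = true := by
    intro n hnmem
    rw [hns] at hnmem
    obtain ⟨pr, hprf, rfl⟩ := List.mem_map.1 hnmem
    have hprmem := List.mem_of_mem_filter hprf
    have hq' := List.of_mem_filter hprf
    refine ⟨?_, by rw [← hpq pr hprmem]; exact hq'⟩
    rw [pv_keys_eq_map_fst]; exact List.mem_map_of_mem hprmem
  have hkey_ns : ∀ n ∈ d.keys, p n = true → n ∈ ns := by
    intro n hk hpn
    obtain ⟨v, hmem, hget⟩ := pv_mem_keys_exists d n hk
    rw [hns]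
    refine List.mem_map.2 ⟨(n, v), List.mem_filter.2 ⟨hmem, ?_⟩, rfl⟩
    rw [hpq (n, v) hmem]; exact hpn
  cases hA : (PySem.List.sorted d.keys (fun x => x)).find? p with
  | none =>
    have hnone : ∀ n ∈ d.keys, p n = false := by
      intro n hk
      have := List.find?_eq_none.1 hA n ((PySem.List.mem_sorted _ _ _ n).2 hk)
      simpa using this
    have : ns = [] := by
      by_contra hne
      obtain ⟨n, hn'⟩ := List.exists_mem_of_ne_nil ns hne
      obtain ⟨hk, hpn⟩ := hns_sub n hn'
      rw [hnone n hk] at hpn; exact Bool.false_ne_true hpn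
    rw [this]; rfl
  | some n =>
    obtain ⟨hpn, as, bs, hsplit, hpre⟩ := List.find?_eq_some_iff_append.1 hA
    have hnk : n ∈ d.keys := (PySem.List.mem_sorted _ _ _ n).1 (by rw [hsplit]; simp)
    have hnns : n ∈ ns := hkey_ns n hnk hpn
    cases hB : PySem.List.min? ns (fun y => y) with
    | none => rw [PySem.List.min?_eq_none_iff] at hB; rw [hB] at hnns; simp at hnns
    | some b =>
      have hbns := PySem.List.min?_mem hB
      have hb_le : b ≤ n := PySem.List.min?_isMin hB n hnns
      -- n ≤ b: b is a matching key, so it sits in the sorted list at or after n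
      obtain ⟨hbk, hpb⟩ := hns_sub b hbns
      have hbsorted : b ∈ as ++ n :: bs := by
        rw [← hsplit]; exact (PySem.List.mem_sorted _ _ _ b).2 hbk
      have hn_le : n ≤ b := by
        rcases List.mem_append.1 hbsorted with hbas | hbnbs
        · have := hpre b hbas
          rw [hpb] at this; simp at this
        · rcases List.mem_cons.1 hbnbs with rfl | hbbs
          · exact le_refl _
          · have hpw := PySem.List.sorted_pairwise d.keys (fun x => x)
            rw [hsplit] at hpw
            have := (List.pairwise_append.1 hpw).2.1
            exact (List.pairwise_cons.1 this).1 b hbbs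
      exact congrArg some (le_antisymm hn_le hb_le)

-- ===== VERDICT (by name: the statement is the Claim_ definition above) =====
theorem get_region_py_spec : Claim_equal_get_region_py := by
  intro cp services _
  unfold Spec_get_region_py get_region_py get_region_py_alt
  exact pv_loops_agree _ _ (PySem.Dict.nodup_keys_ofList _)
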